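-- pv_equiv track=rewrite | github.com/andlamb2002/lambro-trainer-v2 | src/scripts/utils.py | generate_auf_variations
-- ===== SOURCE A (Python) =====
-- def _move_to_int(move: str) -> int | None:
--     if move == 'U': return 1
--     if move == 'U2': return 2
--     if move == "U'": return 3
--     return None
--
-- def _int_to_move(i: int) -> str:
--     if i == 1: return 'U'
--     if i == 2: return 'U2'
--     if i == 3: return "U'"
--     return ''
--
-- def merge_adjacent_u_moves(moves_list: list[str]) -> list[str]:
--     result = []
--     i = 0
--     while i < len(moves_list):
--         move = moves_list[i]
--         if move and move[0] == 'U':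
--             total = _move_to_int(move) or 0
--             i += 1
--             while i < len(moves_list) and moves_list[i] and moves_list[i][0] == 'U':
--                 val = _move_to_int(moves_list[i])
--                 if val is not None:
--                     total = (total + val) % 4
--                 i += 1
--             if total != 0:
--                 result.append(_int_to_move(total))
--         else:
--             result.append(move)
--             i += 1
--     return result
--
-- def generate_auf_variations(sequence_str: str) -> list[str]:
--     auf_moves = ['', 'U', "U'", 'U2']
--     variations = []
--     for prefix in auf_moves:
--         for suffix in auf_moves:
--             parts = []
--             if prefix:
--                 parts.append(prefix)
--             parts.append(sequence_str)
--             if suffix: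
--                 parts.append(suffix)
--             merged = merge_adjacent_u_moves(' '.join(parts).split())
--             variations.append(' '.join(merged))
--     return variations
-- ===== SOURCE B (Python) =====
-- def generate_auf_variations(sequence_str):
--     NAMES = ['', 'U', 'U2', "U'"]
--     VALS = {'U': 1, 'U2': 2, "U'": 3}
--
--     # Merge the base sequence ONCE with a single-pass pending-run accumulator.
--     merged = []
--     run = None  # value (mod 4) of the current adjacent U-run, or None
--     for tok in sequence_str.split():
--         if tok.startswith('U'):
--             run = ((run or 0) + VALS.get(tok, 0)) % 4
--         else:
--             if run:
--                 merged.append(NAMES[run])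
--             run = None
--             merged.append(tok)
--     if run:
--         merged.append(NAMES[run])
--
--     def edge(v):
--         return [NAMES[v]] if v else []
--
--     # Each of the 16 variations is derived arithmetically from the merged base:
--     # the AUF prefix/suffix can only combine with the first/last merged token.
--     def variation(p, s):
--         if not merged:
--             return ' '.join(edge((p + s) % 4))
--         if len(merged) == 1 and merged[0] in VALS:
--             return ' '.join(edge((p + VALS[merged[0]] + s) % 4))
--         fv = VALS.get(merged[0], 0)
--         lv = VALS.get(merged[-1], 0)
--         mid = merged[(1 if fv else 0):(len(merged) - (1 if lv else 0))]
--         return ' '.join(edge((p + fv) % 4) + mid + edge((lv + s) % 4))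
--
--     return [variation(p, s) for p in (0, 1, 3, 2) for s in (0, 1, 3, 2)]
-- ===== Notes on version B (the rewrite author's own statement) =====
-- stated objective: alternative
-- what changed: A re-merges all 16 prefix+base+suffix token lists with a manual index/nested-while scan; B merges the base sequence once with a single-pass pending-run accumulator and derives each of the 16 variations arithmetically from the merged list's first/last token (mod-4 boundary combination plus a slice), never re-scanning the sequence.
import Mathlib
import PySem

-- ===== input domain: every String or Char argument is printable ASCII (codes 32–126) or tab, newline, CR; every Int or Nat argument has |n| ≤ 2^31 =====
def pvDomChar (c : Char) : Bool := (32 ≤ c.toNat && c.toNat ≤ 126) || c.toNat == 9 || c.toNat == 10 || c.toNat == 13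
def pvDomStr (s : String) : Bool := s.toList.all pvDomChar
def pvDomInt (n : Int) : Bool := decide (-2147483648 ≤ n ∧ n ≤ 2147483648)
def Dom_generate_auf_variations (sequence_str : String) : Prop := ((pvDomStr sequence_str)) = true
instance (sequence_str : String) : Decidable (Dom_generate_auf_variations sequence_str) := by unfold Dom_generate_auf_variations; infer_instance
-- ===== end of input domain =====

-- B merges the base sequence ONCE with a single-pass pending-run accumulator and derives each of the
-- 16 AUF variations arithmetically from the merged list's boundary tokens, instead of A's 16 full
-- re-merges with a manual index/nested-while scan (objective: alternative).

-- ===== PORT A =====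

def pvMoveToInt (move : String) : Option Int :=
  if move = "U" then some 1
  else if move = "U2" then some 2
  else if move = "U'" then some 3
  else none

def pvIntToMove (i : Int) : String :=
  if i = 1 then "U" else if i = 2 then "U2" else if i = 3 then "U'" else ""

-- inner `while` of merge_adjacent_u_moves: consumes the rest of a U-run, returns (total, remaining list)
def pvRunA : List String → Int → Int × List String
  | [], total => (total, [])
  | m :: rest, total =>
    if m ≠ "" ∧ PySem.Str.pyGet? m 0 = some 'U' then
      pvRunA rest (match pvMoveToInt m with
                   | some v => PySem.Int.mod (total + v) 4
                   | none => total)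
    else (total, m :: rest)

-- termination lemma for pvMergeA (the inner loop only consumes tokens)
theorem pvRunA_len (l : List String) (t : Int) : (pvRunA l t).2.length ≤ l.length := by
  induction l generalizing t with
  | nil => simp [pvRunA]
  | cons m rest ih =>
    simp only [pvRunA]
    split
    · exact le_trans (ih _) (Nat.le_succ _)
    · simp

-- outer `while` of merge_adjacent_u_moves, as structural recursion over the remaining tokens
def pvMergeA : List String → List String
  | [] => []
  | m :: rest =>
    if m ≠ "" ∧ PySem.Str.pyGet? m 0 = some 'U' then
      (if (pvRunA rest ((pvMoveToInt m).getD 0)).1 ≠ 0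
        then [pvIntToMove (pvRunA rest ((pvMoveToInt m).getD 0)).1] else []) ++
      pvMergeA (pvRunA rest ((pvMoveToInt m).getD 0)).2
    else m :: pvMergeA rest
termination_by l => l.length
decreasing_by
  · exact Nat.lt_succ_of_le (pvRunA_len ..)
  · simp

def generate_auf_variations (sequence_str : String) : List String :=
  let auf_moves := ["", "U", "U'", "U2"]
  auf_moves.foldl (fun variations pre =>
    auf_moves.foldl (fun variations suf =>
      let parts := (if pre ≠ "" then [pre] else []) ++ [sequence_str] ++
                   (if suf ≠ "" then [suf] else [])
      let merged := pvMergeA (PySem.Str.split₀ (PySem.Str.join " " parts))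
      variations ++ [PySem.Str.join " " merged]) variations) []

-- ===== PORT B =====

def pvNames : List String := ["", "U", "U2", "U'"]

def pvVals : PySem.Dict String Int := PySem.Dict.ofList [("U", 1), ("U2", 2), ("U'", 3)]

-- tok.startswith('U')
def pvIsU (t : String) : Bool := PySem.Str.startswith t "U"

-- VALS.get(tok, 0)
def pvUVal (t : String) : Int := PySem.Dict.getD pvVals t 0

-- NAMES[v]; every call site has 0 ≤ v ≤ 3, so pyGet? is in range and the default never fires
def pvName (v : Int) : String := (PySem.List.pyGet? pvNames v).getD ""

-- Python truthiness of `run` (None and 0 are falsy)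
def pvRunTruthy : Option Int → Bool
  | none => false
  | some v => v != 0

-- the body of B's single merge loop; state = (merged, run)
def pvStepB (st : List String × Option Int) (tok : String) : List String × Option Int :=
  if pvIsU tok then
    (st.1, some (PySem.Int.mod (st.2.getD 0 + pvUVal tok) 4))
  else
    ((if pvRunTruthy st.2 then st.1 ++ [pvName (st.2.getD 0)] else st.1) ++ [tok], none)

-- the `if run: merged.append(NAMES[run])` epilogue
def pvFlush (st : List String × Option Int) : List String :=
  if pvRunTruthy st.2 then st.1 ++ [pvName (st.2.getD 0)] else st.1

def pvMergedOf (toks : List String) : List String := pvFlush (toks.foldl pvStepB ([], none))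

-- edge(v) = [NAMES[v]] if v else []
def pvEdge (v : Int) : List String := if v ≠ 0 then [pvName v] else []

-- variation(p, s): merged[0] → headD (guarded merged ≠ []), merged[-1] → getLastD, merged[a:b] → slice
def pvVariation (merged : List String) (p s : Int) : String :=
  if merged = [] then PySem.Str.join " " (pvEdge (PySem.Int.mod (p + s) 4))
  else if merged.length = 1 ∧ PySem.Dict.contains pvVals (merged.headD "") then
    PySem.Str.join " " (pvEdge (PySem.Int.mod (p + pvUVal (merged.headD "") + s) 4))
  else
    let fv := pvUVal (merged.headD "")
    let lv := pvUVal (merged.getLastD "")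
    let mid := PySem.List.slice merged (some (if fv ≠ 0 then (1 : Int) else 0))
                 (some ((merged.length : Int) - (if lv ≠ 0 then 1 else 0)))
    PySem.Str.join " " (pvEdge (PySem.Int.mod (p + fv) 4) ++ mid ++ pvEdge (PySem.Int.mod (lv + s) 4))

def generate_auf_variations_alt (sequence_str : String) : List String :=
  let merged := pvMergedOf (PySem.Str.split₀ sequence_str)
  ([0, 1, 3, 2] : List Int).flatMap (fun p =>
    ([0, 1, 3, 2] : List Int).map (fun s => pvVariation merged p s))

-- ===== PRECONDITION & SPEC =====
def Spec_generate_auf_variations (sequence_str : String) (out : List String) : Prop := out = generate_auf_variations_alt sequence_str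
instance (sequence_str : String) (out : List String) : Decidable (Spec_generate_auf_variations sequence_str out) := by unfold Spec_generate_auf_variations; infer_instance

-- ===== CLAIM (what is proved, stated in full; the proofs are below) =====
def Claim_equal_generate_auf_variations : Prop := ∀ (sequence_str : String), Dom_generate_auf_variations sequence_str → Spec_generate_auf_variations sequence_str (generate_auf_variations sequence_str)

-- ===== LEMMAS AND PROOFS =====


theorem pvIsU_iff (t : String) :
    pvIsU t = true ↔ (t ≠ "" ∧ PySem.Str.pyGet? t 0 = some 'U') := by
  rw [pvIsU, PySem.Str.startswith, PySem.Str.pyGet?, PySem.Chars.pyGet?,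
      Ne, String.toList_eq_nil_iff.symm.not]
  cases h : t.toList with
  | nil => simp [PySem.Chars.startswith, h, PySem.List.pyGet?, PySem.List.pyIdx?]
  | cons c cs =>
    have : t ≠ "" := by intro he; rw [he] at h; simp at h
    simp [PySem.Chars.startswith, h, List.isPrefixOf, PySem.List.pyGet?, PySem.List.pyIdx?, this,
      String.toList_eq_nil_iff, eq_comm (a := c)]

theorem pvVals_items : pvVals.items = [("U", (1 : Int)), ("U2", 2), ("U'", 3)] := by decide

theorem pvUVal_eq (m : String) : pvUVal m = (pvMoveToInt m).getD 0 := by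
  by_cases h1 : m = "U"
  · subst h1; decide
  · by_cases h2 : m = "U2"
    · subst h2; decide
    · by_cases h3 : m = "U'"
      · subst h3; decide
      · simp [pvUVal, pvMoveToInt, PySem.Dict.getD, PySem.Dict.get?, pvVals_items, List.find?,
          h1, h2, h3,
          show (("U" : String) == m) = false from beq_eq_false_iff_ne.mpr (Ne.symm h1),
          show (("U2" : String) == m) = false from beq_eq_false_iff_ne.mpr (Ne.symm h2),
          show (("U'" : String) == m) = false from beq_eq_false_iff_ne.mpr (Ne.symm h3)]

theorem pvNotU_keys (t : String) (h : pvIsU t = false) : t ≠ "U" ∧ t ≠ "U2" ∧ t ≠ "U'" := by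
  refine ⟨?_, ?_, ?_⟩ <;> (intro rfl; exact absurd h (by decide))

theorem pvUVal_notU (t : String) (h : pvIsU t = false) : pvUVal t = 0 := by
  obtain ⟨h1, h2, h3⟩ := pvNotU_keys t h
  rw [pvUVal_eq]
  simp [pvMoveToInt, h1, h2, h3]

theorem pvContains_notU (t : String) (h : pvIsU t = false) :
    PySem.Dict.contains pvVals t = false := by
  obtain ⟨h1, h2, h3⟩ := pvNotU_keys t h
  simp [PySem.Dict.contains, pvVals_items, Ne.symm h1, Ne.symm h2, Ne.symm h3]

theorem pvName_eq (v : Int) (h0 : 0 ≤ v) (h4 : v < 4) : pvName v = pvIntToMove v := by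
  interval_cases v <;> decide

theorem pvUVal_name (v : Int) (h0 : 0 < v) (h4 : v < 4) : pvUVal (pvName v) = v := by
  interval_cases v <;> decide

theorem pvEdge_all_isU (v : Int) (h0 : 0 ≤ v) (h4 : v < 4) : ∀ x ∈ pvEdge v, pvIsU x = true := by
  interval_cases v <;> decide

theorem pvEdge_sum (v : Int) (h0 : 0 ≤ v) (h4 : v < 4) : ((pvEdge v).map pvUVal).sum = v := by
  interval_cases v <;> decide

theorem pvEdge_ite (v : Int) : pvEdge v = if v ≠ 0 then [pvName v] else [] := rfl

theorem pvRunA_spec (l : List String) (total : Int) (h0 : 0 ≤ total) (h4 : total < 4) :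
    pvRunA l total =
      (PySem.Int.mod (total + ((l.takeWhile pvIsU).map pvUVal).sum) 4, l.dropWhile pvIsU) := by
  induction l generalizing total with
  | nil =>
    simp [pvRunA, PySem.Int.mod_eq_emod_of_pos (by norm_num : (0:Int) < 4)]
    omega
  | cons m rest ih =>
    by_cases hU : pvIsU m = true
    · have hc := (pvIsU_iff m).mp hU
      rw [pvRunA, if_pos hc, List.takeWhile_cons, if_pos hU, List.dropWhile_cons, if_pos hU]
      simp only [List.map_cons, List.sum_cons, pvUVal_eq m]
      cases hv : pvMoveToInt m with
      | none =>
        simp only [hv, Option.getD_none]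
        rw [ih total h0 h4]
        simp
      | some v =>
        simp only [hv, Option.getD_some]
        have hpos : (0:Int) < 4 := by norm_num
        rw [ih _ (PySem.Int.mod_nonneg _ hpos) (PySem.Int.mod_lt _ hpos)]
        simp only [PySem.Int.mod_eq_emod_of_pos hpos, List.map_cons, List.sum_cons, Prod.mk.injEq]
        exact ⟨by omega, trivial⟩
    · have hc : ¬ (m ≠ "" ∧ PySem.Str.pyGet? m 0 = some 'U') := fun hx => hU ((pvIsU_iff m).mpr hx)
      rw [pvRunA, if_neg hc, List.takeWhile_cons, if_neg hU, List.dropWhile_cons, if_neg hU]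
      simp [PySem.Int.mod_eq_emod_of_pos (by norm_num : (0:Int) < 4)]
      omega


theorem pvMove_bounds (m : String) :
    0 ≤ (pvMoveToInt m).getD 0 ∧ (pvMoveToInt m).getD 0 < 4 := by
  unfold pvMoveToInt; split_ifs <;> simp <;> norm_num

theorem pvUVal_bounds (t : String) : 0 ≤ pvUVal t ∧ pvUVal t < 4 := by
  rw [pvUVal_eq]; exact pvMove_bounds t

-- a maximal U-run followed by nothing: merge is one edge token
theorem pvMergeA_run (l : List String) (h : ∀ x ∈ l, pvIsU x = true) :
    pvMergeA l = pvEdge (PySem.Int.mod ((l.map pvUVal).sum) 4) := by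
  cases l with
  | nil =>
    have : PySem.Int.mod 0 4 = 0 := by decide
    simp [pvMergeA, this, pvEdge]
  | cons m rest =>
    have hU : pvIsU m = true := h m (by simp)
    have hc := (pvIsU_iff m).mp hU
    obtain ⟨hb0, hb4⟩ := pvMove_bounds m
    have htw : rest.takeWhile pvIsU = rest :=
      List.takeWhile_eq_self_iff.mpr (fun x hx => h x (by simp [hx]))
    have hdw : rest.dropWhile pvIsU = [] :=
      List.dropWhile_eq_nil_iff.mpr (fun x hx => h x (by simp [hx]))
    rw [pvMergeA, if_pos hc, pvRunA_spec rest _ hb0 hb4, htw, hdw]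
    have hpos : (0:Int) < 4 := by norm_num
    set T := PySem.Int.mod ((pvMoveToInt m).getD 0 + (rest.map pvUVal).sum) 4 with hT
    have hTe : T = PySem.Int.mod (((m :: rest).map pvUVal).sum) 4 := by
      simp [hT, pvUVal_eq]
    rw [pvMergeA]
    rw [← hTe, pvEdge_ite]
    by_cases hz : T ≠ 0
    · rw [if_pos hz, if_pos hz,
        pvName_eq T (PySem.Int.mod_nonneg _ hpos) (PySem.Int.mod_lt _ hpos)]
      simp
    · rw [if_neg hz, if_neg hz]
      simp

-- a maximal U-run followed by a non-U token
theorem pvMergeA_split (run : List String) (t : String) (rest : List String)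
    (hrun : ∀ x ∈ run, pvIsU x = true) (ht : pvIsU t = false) :
    pvMergeA (run ++ t :: rest) =
      pvEdge (PySem.Int.mod ((run.map pvUVal).sum) 4) ++ t :: pvMergeA rest := by
  cases run with
  | nil =>
    have hc : ¬ (t ≠ "" ∧ PySem.Str.pyGet? t 0 = some 'U') :=
      fun hx => by simp [(pvIsU_iff t).mpr hx] at ht
    have : PySem.Int.mod 0 4 = 0 := by decide
    rw [List.nil_append, pvMergeA, if_neg hc]
    simp [this, pvEdge]
  | cons w ws =>
    have hU : pvIsU w = true := hrun w (by simp)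
    have hc := (pvIsU_iff w).mp hU
    obtain ⟨hb0, hb4⟩ := pvMove_bounds w
    have htww : ws.takeWhile pvIsU = ws :=
      List.takeWhile_eq_self_iff.mpr (fun x hx => hrun x (by simp [hx]))
    have htw : (ws ++ t :: rest).takeWhile pvIsU = ws := by
      rw [List.takeWhile_append, htww, if_pos rfl, List.takeWhile_cons, if_neg (by simp [ht])]
      simp
    have hdw : (ws ++ t :: rest).dropWhile pvIsU = t :: rest := by
      rw [List.dropWhile_append]
      have : ws.dropWhile pvIsU = [] :=
        List.dropWhile_eq_nil_iff.mpr (fun x hx => hrun x (by simp [hx]))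
      rw [this]
      simp [ht]
    rw [List.cons_append, pvMergeA, if_pos hc, pvRunA_spec _ _ hb0 hb4, htw, hdw]
    have hpos : (0:Int) < 4 := by norm_num
    set T := PySem.Int.mod ((pvMoveToInt w).getD 0 + (ws.map pvUVal).sum) 4 with hT
    have hTe : T = PySem.Int.mod (((w :: ws).map pvUVal).sum) 4 := by
      simp [hT, pvUVal_eq]
    have hc2 : ¬ (t ≠ "" ∧ PySem.Str.pyGet? t 0 = some 'U') :=
      fun hx => by simp [(pvIsU_iff t).mpr hx] at ht
    rw [pvMergeA, if_neg hc2, ← hTe, pvEdge_ite]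
    by_cases hz : T ≠ 0
    · rw [if_pos hz, if_pos hz,
        pvName_eq T (PySem.Int.mod_nonneg _ hpos) (PySem.Int.mod_lt _ hpos)]
    · rw [if_neg hz, if_neg hz]

-- B's fold over a U-run only accumulates the pending value
theorem pvRunB (ws : List String) (hws : ∀ x ∈ ws, pvIsU x = true) (out : List String)
    (v : Int) (h0 : 0 ≤ v) (h4 : v < 4) :
    ws.foldl pvStepB (out, some v) = (out, some (PySem.Int.mod (v + (ws.map pvUVal).sum) 4)) := by
  have hpos : (0:Int) < 4 := by norm_num
  induction ws generalizing v with
  | nil =>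
    simp [PySem.Int.mod_eq_emod_of_pos hpos]
    omega
  | cons w ws ih =>
    have hU : pvIsU w = true := hws w (by simp)
    rw [List.foldl_cons, pvStepB, if_pos hU]
    simp only [Option.getD_some]
    rw [ih (fun x hx => hws x (by simp [hx])) _ (PySem.Int.mod_nonneg _ hpos)
        (PySem.Int.mod_lt _ hpos)]
    simp only [List.map_cons, List.sum_cons, Prod.mk.injEq, Option.some.injEq,
      PySem.Int.mod_eq_emod_of_pos hpos]
    refine ⟨trivial, ?_⟩
    omega

theorem pvDropWhile_head_false {p : String → Bool} {l : List String} {d : String}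
    {ds : List String} (h : l.dropWhile p = d :: ds) : p d = false := by
  induction l with
  | nil => simp at h
  | cons a l ih =>
    rw [List.dropWhile_cons] at h
    split at h
    · exact ih h
    · next hpa => cases h; simpa using hpa

-- the fold invariant: B's single pass computes A's merge
theorem pvFoldInv : ∀ n (l : List String), l.length ≤ n → ∀ out,
    pvFlush (l.foldl pvStepB (out, none)) = out ++ pvMergeA l := by
  intro n
  induction n with
  | zero =>
    intro l hl out
    rw [List.length_eq_zero_iff.mp (Nat.le_zero.mp hl)]
    simp [pvFlush, pvRunTruthy, pvMergeA]
  | succ n ih =>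
    intro l hl out
    cases l with
    | nil => simp [pvFlush, pvRunTruthy, pvMergeA]
    | cons t ts =>
      simp only [List.length_cons, Nat.succ_le_succ_iff] at hl
      by_cases hU : pvIsU t = true
      · have hc := (pvIsU_iff t).mp hU
        obtain ⟨hv0, hv4⟩ := pvUVal_bounds t
        have hstep : pvStepB (out, none) t = (out, some (pvUVal t)) := by
          rw [pvStepB, if_pos hU]
          have : PySem.Int.mod ((none : Option Int).getD 0 + pvUVal t) 4 = pvUVal t := by
            rw [PySem.Int.mod_eq_emod_of_pos (by norm_num)]
            simp only [Option.getD_none, zero_add]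
            omega
          rw [this]
        have hsplit : ts = ts.takeWhile pvIsU ++ ts.dropWhile pvIsU :=
          (List.takeWhile_append_dropWhile).symm
        rw [List.foldl_cons, hstep]
        conv_lhs => rw [hsplit]
        rw [List.foldl_append,
          pvRunB _ (fun x hx => List.mem_takeWhile_imp hx) out _ hv0 hv4]
        have hpos : (0:Int) < 4 := by norm_num
        set T := PySem.Int.mod (pvUVal t + ((ts.takeWhile pvIsU).map pvUVal).sum) 4 with hT
        have hTb : 0 ≤ T ∧ T < 4 := ⟨PySem.Int.mod_nonneg _ hpos, PySem.Int.mod_lt _ hpos⟩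
        obtain ⟨hb0, hb4⟩ := pvMove_bounds t
        have hA : pvMergeA (t :: ts) =
            pvEdge T ++ pvMergeA (ts.dropWhile pvIsU) := by
          rw [pvMergeA, if_pos hc, pvRunA_spec _ _ hb0 hb4, pvEdge_ite]
          have : PySem.Int.mod ((pvMoveToInt t).getD 0 + ((ts.takeWhile pvIsU).map pvUVal).sum) 4
              = T := by rw [hT, pvUVal_eq]
          rw [this]
          by_cases hz : T ≠ 0
          · rw [if_pos hz, if_pos hz, pvName_eq T hTb.1 hTb.2]
          · rw [if_neg hz, if_neg hz]
        cases hD : ts.dropWhile pvIsU with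
        | nil =>
          simp only [List.foldl_nil]
          rw [hA, hD]
          rw [pvMergeA]
          rw [pvFlush]
          by_cases hz : T = 0
          · simp [pvRunTruthy, hz, pvEdge]
          · simp [pvRunTruthy, bne_iff_ne, hz, pvEdge, List.append_assoc]
        | cons d ds =>
          have hd : pvIsU d = false := pvDropWhile_head_false hD
          rw [List.foldl_cons]
          have hstep2 : pvStepB (out, some T) d = (out ++ pvEdge T ++ [d], none) := by
            rw [pvStepB, if_neg (by simp [hd])]
            by_cases hz : T = 0
            · simp [pvRunTruthy, hz, pvEdge]
            · simp [pvRunTruthy, bne_iff_ne, hz, pvEdge,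
                pvName_eq T hTb.1 hTb.2, List.append_assoc]
          rw [hstep2]
          have hlen : ds.length ≤ n := by
            have h1 : (ts.dropWhile pvIsU).length ≤ ts.length := List.length_dropWhile_le _ _
            rw [hD] at h1
            simp at h1
            omega
          rw [ih ds hlen]
          have hAd : pvMergeA (d :: ds) = d :: pvMergeA ds := by
            rw [pvMergeA, if_neg (fun hx => by simp [(pvIsU_iff d).mpr hx] at hd)]
          rw [hA, hD, hAd]
          simp
      · simp only [Bool.not_eq_true] at hU
        rw [List.foldl_cons]
        have hstep : pvStepB (out, none) t = (out ++ [t], none) := by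
          rw [pvStepB, if_neg (by simp [hU])]
          simp [pvRunTruthy]
        rw [hstep, ih ts hl]
        rw [pvMergeA, if_neg (fun hx => by simp [(pvIsU_iff t).mpr hx] at hU)]
        simp

-- B's single-pass fold computes the same merge as A's scan
theorem pvMergedOf_eq (l : List String) : pvMergedOf l = pvMergeA l := by
  have := pvFoldInv l.length l le_rfl []
  simpa [pvMergedOf] using this

def pvLastV (M : List String) : Int := pvUVal (M.getLastD "")
def pvTrim (M : List String) : List String := if pvLastV M ≠ 0 then M.dropLast else M


theorem pvUVal_empty : pvUVal "" = 0 := by decide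

theorem pvLastV_append (P : List String) (t : String) (ht : pvIsU t = false)
    (M2 : List String) : pvLastV (P ++ t :: M2) = pvLastV M2 := by
  cases M2 with
  | nil =>
    show pvUVal ((P ++ [t]).getLastD "") = pvUVal ([].getLastD "")
    rw [List.getLastD_concat]
    simp [pvUVal_notU t ht, pvUVal_empty]
  | cons m ms =>
    show pvUVal ((P ++ t :: m :: ms).getLastD "") = pvUVal ((m :: ms).getLastD "")
    rw [List.getLastD_eq_getLast?, List.getLastD_eq_getLast?,
      show P ++ t :: m :: ms = (P ++ [t]) ++ m :: ms by simp,
      List.getLast?_append_of_ne_nil _ (by simp)]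

theorem pvTrim_append (P : List String) (t : String) (ht : pvIsU t = false)
    (M2 : List String) : pvTrim (P ++ t :: M2) = P ++ t :: pvTrim M2 := by
  rw [pvTrim, pvTrim, pvLastV_append P t ht M2]
  by_cases hz : pvLastV M2 ≠ 0
  · have hM2 : M2 ≠ [] := by
      intro he
      rw [he] at hz
      exact hz (by simp [pvLastV, pvUVal_empty])
    rw [if_pos hz, if_pos hz,
      show P ++ t :: M2 = (P ++ [t]) ++ M2 by simp,
      List.dropLast_append_of_ne_nil hM2]
    simp
  · rw [if_neg hz, if_neg hz]

-- appending an AUF suffix = trailing-run arithmetic on the merged list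
theorem pvMergeA_tail (l : List String) (s : Int) (h0 : 0 ≤ s) (h4 : s < 4) :
    pvMergeA (l ++ pvEdge s) =
      pvTrim (pvMergeA l) ++ pvEdge (PySem.Int.mod (pvLastV (pvMergeA l) + s) 4) := by
  have hpos : (0:Int) < 4 := by norm_num
  have key : ∀ n (l : List String), l.length ≤ n →
      pvMergeA (l ++ pvEdge s) =
        pvTrim (pvMergeA l) ++ pvEdge (PySem.Int.mod (pvLastV (pvMergeA l) + s) 4) := by
    intro n
    induction n with
    | zero =>
      intro l hl
      rw [List.length_eq_zero_iff.mp (Nat.le_zero.mp hl)]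
      have hall : ∀ x ∈ pvEdge s, pvIsU x = true := pvEdge_all_isU s h0 h4
      rw [List.nil_append, pvMergeA_run _ hall, pvMergeA]
      have : pvTrim ([] : List String) = [] := by
        rw [pvTrim, if_neg]
        simp [pvLastV, pvUVal_empty]
      rw [this, List.nil_append]
      have hls : pvLastV ([] : List String) = 0 := by simp [pvLastV, pvUVal_empty]
      rw [hls, pvEdge_sum s h0 h4]
      congr 1
      rw [PySem.Int.mod_eq_emod_of_pos hpos, PySem.Int.mod_eq_emod_of_pos hpos]
      omega
    | succ n ih =>
      intro l hl
      cases hD : l.dropWhile pvIsU with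
      | nil =>
        have hall : ∀ x ∈ l, pvIsU x = true := List.dropWhile_eq_nil_iff.mp hD
        have hallE : ∀ x ∈ l ++ pvEdge s, pvIsU x = true := by
          intro x hx
          rcases List.mem_append.mp hx with h | h
          · exact hall x h
          · exact pvEdge_all_isU s h0 h4 x h
        rw [pvMergeA_run _ hallE, pvMergeA_run _ hall]
        rw [List.map_append, List.sum_append, pvEdge_sum s h0 h4]
        set v := PySem.Int.mod ((l.map pvUVal).sum) 4 with hv
        have hvb : 0 ≤ v ∧ v < 4 := ⟨PySem.Int.mod_nonneg _ hpos, PySem.Int.mod_lt _ hpos⟩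
        by_cases hz : v = 0
        · have he : pvEdge v = [] := by rw [pvEdge_ite, if_neg (by simp [hz])]
          rw [he]
          have : pvTrim ([] : List String) = [] := by
            rw [pvTrim, if_neg]; simp [pvLastV, pvUVal_empty]
          rw [this, List.nil_append, show pvLastV ([] : List String) = 0 by
            simp [pvLastV, pvUVal_empty]]
          congr 1
          rw [PySem.Int.mod_eq_emod_of_pos hpos, PySem.Int.mod_eq_emod_of_pos hpos] at *
          omega
        · have he : pvEdge v = [pvName v] := by rw [pvEdge_ite, if_pos (by simp [hz])]
          rw [he]
          have hlv : pvLastV [pvName v] = v := by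
            show pvUVal ([pvName v].getLastD "") = v
            simp [pvUVal_name v (lt_of_le_of_ne hvb.1 (Ne.symm hz)) hvb.2]
          have : pvTrim [pvName v] = [] := by
            rw [pvTrim, if_pos (by rw [hlv]; exact hz)]
            simp
          rw [this, hlv, List.nil_append]
          congr 1
          rw [PySem.Int.mod_eq_emod_of_pos hpos, PySem.Int.mod_eq_emod_of_pos hpos] at *
          omega
      | cons t ts =>
        have ht : pvIsU t = false := pvDropWhile_head_false hD
        have hR : ∀ x ∈ l.takeWhile pvIsU, pvIsU x = true :=
          fun x hx => List.mem_takeWhile_imp hx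
        have hsplit : l = l.takeWhile pvIsU ++ t :: ts := by
          conv_lhs => rw [← List.takeWhile_append_dropWhile (p := pvIsU) (l := l)]
          rw [hD]
        have hlen : ts.length ≤ n := by
          have : l.length = (l.takeWhile pvIsU).length + (ts.length + 1) := by
            conv_lhs => rw [hsplit]
            simp
          omega
        rw [hsplit, List.append_assoc, List.cons_append,
          pvMergeA_split _ t _ hR ht, pvMergeA_split _ t _ hR ht, ih ts hlen,
          pvTrim_append _ t ht, pvLastV_append _ t ht]
        simp
  exact key l.length l le_rfl


theorem pvContains_name (v : Int) (h0 : 0 < v) (h4 : v < 4) :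
    PySem.Dict.contains pvVals (pvName v) = true := by
  interval_cases v <;> decide

-- the per-variation equality: A's full re-merge = B's boundary arithmetic on the merged base
theorem pvMain (base : List String) (p s : Int) (hp0 : 0 ≤ p) (hp4 : p < 4)
    (hs0 : 0 ≤ s) (hs4 : s < 4) :
    PySem.Str.join " " (pvMergeA (pvEdge p ++ base ++ pvEdge s)) =
      pvVariation (pvMergeA base) p s := by
  have hpos : (0:Int) < 4 := by norm_num
  cases hD : base.dropWhile pvIsU with
  | nil =>
    have hall : ∀ x ∈ base, pvIsU x = true := List.dropWhile_eq_nil_iff.mp hD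
    have hallF : ∀ x ∈ pvEdge p ++ base ++ pvEdge s, pvIsU x = true := by
      intro x hx
      rcases List.mem_append.mp hx with h | h
      · rcases List.mem_append.mp h with h' | h'
        · exact pvEdge_all_isU p hp0 hp4 x h'
        · exact hall x h'
      · exact pvEdge_all_isU s hs0 hs4 x h
    rw [pvMergeA_run _ hallF, pvMergeA_run _ hall]
    rw [List.map_append, List.map_append, List.sum_append, List.sum_append,
      pvEdge_sum p hp0 hp4, pvEdge_sum s hs0 hs4]
    set v := PySem.Int.mod ((base.map pvUVal).sum) 4 with hv
    have hvb : 0 ≤ v ∧ v < 4 := ⟨PySem.Int.mod_nonneg _ hpos, PySem.Int.mod_lt _ hpos⟩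
    by_cases hz : v = 0
    · have he : pvEdge v = [] := by rw [pvEdge_ite, if_neg (by simp [hz])]
      rw [he, pvVariation, if_pos rfl]
      congr 2
      rw [PySem.Int.mod_eq_emod_of_pos hpos, PySem.Int.mod_eq_emod_of_pos hpos] at *
      omega
    · have hv0 : 0 < v := lt_of_le_of_ne hvb.1 (Ne.symm hz)
      have he : pvEdge v = [pvName v] := by rw [pvEdge_ite, if_pos (by simp [hz])]
      rw [he, pvVariation, if_neg (by simp),
        if_pos ⟨by simp, by simp [pvContains_name v hv0 hvb.2]⟩]
      simp only [List.headD_cons]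
      rw [pvUVal_name v hv0 hvb.2]
      congr 2
      rw [PySem.Int.mod_eq_emod_of_pos hpos, PySem.Int.mod_eq_emod_of_pos hpos] at *
      omega
  | cons t ts =>
    have ht : pvIsU t = false := pvDropWhile_head_false hD
    have hR : ∀ x ∈ base.takeWhile pvIsU, pvIsU x = true :=
      fun x hx => List.mem_takeWhile_imp hx
    have hPR : ∀ x ∈ pvEdge p ++ base.takeWhile pvIsU, pvIsU x = true := by
      intro x hx
      rcases List.mem_append.mp hx with h | h
      · exact pvEdge_all_isU p hp0 hp4 x h
      · exact hR x h
    have hsplit : base = base.takeWhile pvIsU ++ t :: ts := by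
      conv_lhs => rw [← List.takeWhile_append_dropWhile (p := pvIsU) (l := base)]
      rw [hD]
    set R := base.takeWhile pvIsU with hRdef
    set M2 := pvMergeA ts with hM2
    set v1 := PySem.Int.mod ((R.map pvUVal).sum) 4 with hv1
    have hv1b : 0 ≤ v1 ∧ v1 < 4 := ⟨PySem.Int.mod_nonneg _ hpos, PySem.Int.mod_lt _ hpos⟩
    set lv2 := pvLastV M2 with hlv2
    -- LHS
    have hL : pvMergeA (pvEdge p ++ base ++ pvEdge s) =
        pvEdge (PySem.Int.mod (p + (R.map pvUVal).sum) 4) ++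
          t :: (pvTrim M2 ++ pvEdge (PySem.Int.mod (lv2 + s) 4)) := by
      conv_lhs => rw [hsplit]
      rw [show pvEdge p ++ (R ++ t :: ts) ++ pvEdge s
            = (pvEdge p ++ R) ++ t :: (ts ++ pvEdge s) by simp,
        pvMergeA_split _ t _ hPR ht, pvMergeA_tail ts s hs0 hs4,
        List.map_append, List.sum_append, pvEdge_sum p hp0 hp4, ← hM2, ← hlv2]
    -- RHS merged list
    have hM : pvMergeA base = pvEdge v1 ++ t :: M2 := by
      conv_lhs => rw [hsplit]
      rw [pvMergeA_split _ t _ hR ht, ← hM2, ← hv1]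
    rw [hL, hM]
    -- the two guards of pvVariation are false
    have hne : pvEdge v1 ++ t :: M2 ≠ [] := by simp
    have hguard : ¬ ((pvEdge v1 ++ t :: M2).length = 1 ∧
        PySem.Dict.contains pvVals ((pvEdge v1 ++ t :: M2).headD "") = true) := by
      rintro ⟨hlen, hcon⟩
      by_cases hz : v1 = 0
      · have he : pvEdge v1 = [] := by rw [pvEdge_ite, if_neg (by simp [hz])]
        rw [he] at hcon
        simp at hcon
        rw [pvContains_notU t ht] at hcon
        exact Bool.false_ne_true hcon
      · have he : pvEdge v1 = [pvName v1] := by rw [pvEdge_ite, if_pos (by simp [hz])]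
        rw [he] at hlen
        simp at hlen
    rw [pvVariation, if_neg hne, if_neg hguard]
    -- head value
    have hfv : pvUVal ((pvEdge v1 ++ t :: M2).headD "") = v1 := by
      by_cases hz : v1 = 0
      · have he : pvEdge v1 = [] := by rw [pvEdge_ite, if_neg (by simp [hz])]
        rw [he]
        simp [pvUVal_notU t ht, hz]
      · have hv0 : 0 < v1 := lt_of_le_of_ne hv1b.1 (Ne.symm hz)
        have he : pvEdge v1 = [pvName v1] := by rw [pvEdge_ite, if_pos (by simp [hz])]
        rw [he]
        simp [pvUVal_name v1 hv0 hv1b.2]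
    -- last value
    have hlv : pvUVal ((pvEdge v1 ++ t :: M2).getLastD "") = lv2 :=
      pvLastV_append _ t ht M2
    -- the slice is t :: pvTrim M2
    have hmid : PySem.List.slice (pvEdge v1 ++ t :: M2)
        (some (if v1 ≠ 0 then (1 : Int) else 0))
        (some (((pvEdge v1 ++ t :: M2).length : Int) - (if lv2 ≠ 0 then 1 else 0)))
        = t :: pvTrim M2 := by
      by_cases hz : v1 = 0
      · have he : pvEdge v1 = [] := by rw [pvEdge_ite, if_neg (by simp [hz])]
        rw [he, if_neg (by simp [hz]), List.nil_append]
        by_cases hlz : lv2 ≠ 0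
        · have hM2ne : M2 ≠ [] := by
            intro hemp
            exact hlz (by rw [hlv2, hemp]; simp [pvLastV, pvUVal_empty])
          rw [if_pos hlz, PySem.List.slice_toNat _ (by norm_num) (by simp <;> omega)]
          have h1 : ((0:Int)).toNat = 0 := rfl
          have h2 : (((t :: M2).length : Int) - 1).toNat = M2.length := by simp <;> omega
          rw [h1, h2, List.drop_zero]
          rw [pvTrim, if_pos hlz]
          rw [show (t :: M2).take (M2.length - 0) = (t :: M2).take M2.length by simp]
          rw [show M2.length = (t :: M2).length - 1 by simp, ← List.dropLast_eq_take,
            List.dropLast_cons_of_ne_nil hM2ne]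
        · rw [if_neg hlz, PySem.List.slice_toNat _ (by norm_num) (by simp <;> omega)]
          simp only [not_not] at hlz
          rw [pvTrim, if_neg (by rw [← hlv2]; simp [hlz])]
          have h2 : (((t :: M2).length : Int) - 0).toNat = M2.length + 1 := by simp
          rw [h2]
          simp [List.take_of_length_le]
      · have hv0 : 0 < v1 := lt_of_le_of_ne hv1b.1 (Ne.symm hz)
        have he : pvEdge v1 = [pvName v1] := by rw [pvEdge_ite, if_pos (by simp [hz])]
        rw [he, if_pos (by simp [hz]), List.singleton_append]
        by_cases hlz : lv2 ≠ 0
        · have hM2ne : M2 ≠ [] := by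
            intro hemp
            exact hlz (by rw [hlv2, hemp]; simp [pvLastV, pvUVal_empty])
          rw [if_pos hlz, PySem.List.slice_toNat _ (by norm_num) (by simp <;> omega)]
          have h1 : ((1:Int)).toNat = 1 := rfl
          have h2 : (((pvName v1 :: t :: M2).length : Int) - 1).toNat = M2.length + 1 := by
            simp <;> omega
          rw [h1, h2, List.drop_one, List.tail_cons]
          rw [pvTrim, if_pos hlz]
          rw [show M2.length + 1 - 1 = (t :: M2).length - 1 by simp, ← List.dropLast_eq_take,
            List.dropLast_cons_of_ne_nil hM2ne]
        · rw [if_neg hlz, PySem.List.slice_toNat _ (by norm_num) (by simp <;> omega)]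
          simp only [not_not] at hlz
          rw [pvTrim, if_neg (by rw [← hlv2]; simp [hlz])]
          have h2 : (((pvName v1 :: t :: M2).length : Int) - 0).toNat = M2.length + 2 := by
            simp <;> omega
          rw [h2]
          have h1 : ((1:Int)).toNat = 1 := rfl
          rw [h1, List.drop_one, List.tail_cons]
          simp [List.take_of_length_le]
    have harith : PySem.Int.mod (p + (R.map pvUVal).sum) 4 = PySem.Int.mod (p + v1) 4 := by
      rw [hv1]
      rw [PySem.Int.mod_eq_emod_of_pos hpos, PySem.Int.mod_eq_emod_of_pos hpos,
        PySem.Int.mod_eq_emod_of_pos hpos]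
      omega
    -- assemble: both sides are joins of the same list (zeta-reduce the lets, rewrite, reassociate)
    simp only [hfv, hlv, hmid, harith]
    congr 1
    simp

-- split₀-over-append lemmas (accumulator recursion of PySem.Chars.split₀.go)

theorem go_acc (cs : List Char) (cur : List Char) (acc : List (List Char)) :
    PySem.Chars.split₀.go cs cur acc = acc.reverse ++ PySem.Chars.split₀.go cs cur [] := by
  induction cs generalizing cur acc with
  | nil =>
    by_cases h : cur.isEmpty <;> simp [PySem.Chars.split₀.go, h]
  | cons c rest ih =>
    by_cases hs : PySem.Chars.isspace c
    · by_cases h : cur.isEmpty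
      · simp only [PySem.Chars.split₀.go, hs, h, if_true]
        rw [ih]
      · simp only [PySem.Chars.split₀.go, hs, h, Bool.false_eq_true, if_false, if_true]
        rw [ih, ih [] (cur.reverse :: _)]
        simp
    · simp only [PySem.Chars.split₀.go, hs, Bool.false_eq_true, if_false]
      exact ih _ _

theorem go_word (w : List Char) (cs : List Char) (cur : List Char) (acc : List (List Char))
    (hw : w.all (fun c => !PySem.Chars.isspace c)) :
    PySem.Chars.split₀.go (w ++ cs) cur acc = PySem.Chars.split₀.go cs (w.reverse ++ cur) acc := by
  induction w generalizing cur with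
  | nil => simp
  | cons c rest ih =>
    simp only [List.all_cons, Bool.and_eq_true, Bool.not_eq_true'] at hw
    simp only [List.cons_append, PySem.Chars.split₀.go, hw.1, Bool.false_eq_true, if_false]
    rw [ih _ (by simp [List.all_eq_true] at hw ⊢; exact hw.2)]
    simp

theorem split₀_word_cons (w : List Char) (cs : List Char)
    (hne : w ≠ []) (hw : w.all (fun c => !PySem.Chars.isspace c)) :
    PySem.Chars.split₀ (w ++ ' ' :: cs) = w :: PySem.Chars.split₀ cs := by
  rw [PySem.Chars.split₀, go_word w _ _ _ hw]
  have hsp : PySem.Chars.isspace ' ' = true := by decide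
  have hcur : (w.reverse ++ ([] : List Char)).isEmpty = false := by
    simp [List.isEmpty_iff, hne]
  simp only [PySem.Chars.split₀.go, hsp, if_true, hcur, Bool.false_eq_true, if_false]
  rw [go_acc]
  simp [PySem.Chars.split₀]

theorem split₀_append_word (w : List Char) (cs : List Char)
    (hne : w ≠ []) (hw : w.all (fun c => !PySem.Chars.isspace c)) :
    PySem.Chars.split₀ (cs ++ ' ' :: w) = PySem.Chars.split₀ cs ++ [w] := by
  have main : ∀ cs cur acc, PySem.Chars.split₀.go (cs ++ ' ' :: w) cur acc
      = PySem.Chars.split₀.go cs cur acc ++ [w] := by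
    intro cs
    induction cs with
    | nil =>
      intro cur acc
      have hsp : PySem.Chars.isspace ' ' = true := by decide
      have hword : ∀ acc', PySem.Chars.split₀.go w [] acc' = acc'.reverse ++ [w] := by
        intro acc'
        rw [show PySem.Chars.split₀.go w [] acc' = PySem.Chars.split₀.go (w ++ []) [] acc' by simp,
          go_word w [] [] acc' hw]
        have : (w.reverse ++ ([] : List Char)).isEmpty = false := by simp [List.isEmpty_iff, hne]
        simp [PySem.Chars.split₀.go, this, hne]
      by_cases h : cur.isEmpty <;>
        simp [PySem.Chars.split₀.go, hsp, h, hword]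
    | cons c rest ih =>
      intro cur acc
      by_cases hs : PySem.Chars.isspace c
      · by_cases h : cur.isEmpty <;>
          simp only [List.cons_append, PySem.Chars.split₀.go, hs, h, if_true, if_false] <;>
          exact ih _ _
      · simp only [List.cons_append, PySem.Chars.split₀.go, hs, Bool.false_eq_true, if_false]
        exact ih _ _
  rw [PySem.Chars.split₀, PySem.Chars.split₀, main]

-- Str-level corollaries for the three concrete AUF tokens
theorem str_split₀_eq (s : String) :
    PySem.Str.split₀ s = List.map String.ofList (PySem.Chars.split₀ s.toList) := rfl

theorem isUtok (w : String) (hw : w = "U" ∨ w = "U'" ∨ w = "U2") :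
    w.toList ≠ [] ∧ w.toList.all (fun c => !PySem.Chars.isspace c) = true := by
  rcases hw with h | h | h <;> subst h <;> decide

theorem split_join_pre (p s : String) (hp : p = "U" ∨ p = "U'" ∨ p = "U2") :
    PySem.Str.split₀ (PySem.Str.join " " [p, s]) = p :: PySem.Str.split₀ s := by
  obtain ⟨h1, h2⟩ := isUtok p hp
  rw [str_split₀_eq, PySem.Str.toList_join]
  simp only [List.map_cons, List.map_nil, PySem.Chars.join_cons_cons, PySem.Chars.join_singleton]
  rw [show p.toList ++ " ".toList ++ s.toList = p.toList ++ ' ' :: s.toList by rw [show (" " : String).toList = [' '] from by decide]; simp]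
  rw [split₀_word_cons p.toList s.toList h1 h2]
  simp [str_split₀_eq, String.ofList_toList]

theorem split_join_suf (s w : String) (hw : w = "U" ∨ w = "U'" ∨ w = "U2") :
    PySem.Str.split₀ (PySem.Str.join " " [s, w]) = PySem.Str.split₀ s ++ [w] := by
  obtain ⟨h1, h2⟩ := isUtok w hw
  rw [str_split₀_eq, PySem.Str.toList_join]
  simp only [List.map_cons, List.map_nil, PySem.Chars.join_cons_cons, PySem.Chars.join_singleton]
  rw [show s.toList ++ " ".toList ++ w.toList = s.toList ++ ' ' :: w.toList by rw [show (" " : String).toList = [' '] from by decide]; simp]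
  rw [split₀_append_word w.toList s.toList h1 h2]
  simp [str_split₀_eq, String.ofList_toList]

theorem split_join_both (p s w : String) (hp : p = "U" ∨ p = "U'" ∨ p = "U2")
    (hw : w = "U" ∨ w = "U'" ∨ w = "U2") :
    PySem.Str.split₀ (PySem.Str.join " " [p, s, w]) = p :: (PySem.Str.split₀ s ++ [w]) := by
  obtain ⟨hp1, hp2⟩ := isUtok p hp
  obtain ⟨hw1, hw2⟩ := isUtok w hw
  rw [str_split₀_eq, PySem.Str.toList_join]
  simp only [List.map_cons, List.map_nil, PySem.Chars.join_cons_cons, PySem.Chars.join_singleton]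
  rw [show p.toList ++ " ".toList ++ (s.toList ++ " ".toList ++ w.toList)
        = p.toList ++ ' ' :: (s.toList ++ ' ' :: w.toList) by rw [show (" " : String).toList = [' '] from by decide]; simp]
  rw [split₀_word_cons p.toList _ hp1 hp2, split₀_append_word w.toList s.toList hw1 hw2]
  simp [str_split₀_eq, String.ofList_toList]

theorem split_join_single (s : String) :
    PySem.Str.split₀ (PySem.Str.join " " [s]) = PySem.Str.split₀ s := by
  rw [str_split₀_eq, str_split₀_eq, PySem.Str.toList_join]
  simp [PySem.Chars.join_singleton]

-- ===== VERDICT (by name: the statement is the Claim_ definition above) =====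
theorem generate_auf_variations_spec : Claim_equal_generate_auf_variations := by
  intro s _
  unfold Spec_generate_auf_variations generate_auf_variations generate_auf_variations_alt
  simp only [List.foldl, List.flatMap, List.map]
  norm_num
  have e1 : (if ("U" : String) = "" then ([] : List String) else ["U"]) = ["U"] := by decide
  have e2 : (if ("U'" : String) = "" then ([] : List String) else ["U'"]) = ["U'"] := by decide
  have e3 : (if ("U2" : String) = "" then ([] : List String) else ["U2"]) = ["U2"] := by decide
  simp only [e1, e2, e3, List.singleton_append]
  rw [split_join_single,
      split_join_suf s "U" (by simp), split_join_suf s "U'" (by simp), split_join_suf s "U2" (by simp),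
      split_join_pre "U" s (by simp), split_join_pre "U'" s (by simp), split_join_pre "U2" s (by simp)]
  rw [split_join_both "U" s "U" (by simp) (by simp), split_join_both "U" s "U'" (by simp) (by simp),
      split_join_both "U" s "U2" (by simp) (by simp),
      split_join_both "U'" s "U" (by simp) (by simp), split_join_both "U'" s "U'" (by simp) (by simp),
      split_join_both "U'" s "U2" (by simp) (by simp),
      split_join_both "U2" s "U" (by simp) (by simp), split_join_both "U2" s "U'" (by simp) (by simp),
      split_join_both "U2" s "U2" (by simp) (by simp)]
  rw [pvMergedOf_eq]
  have ed0 : pvEdge (0 : Int) = ([] : List String) := by decide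
  have ed1 : pvEdge (1 : Int) = ["U"] := by decide
  have ed3 : pvEdge (3 : Int) = ["U'"] := by decide
  have ed2 : pvEdge (2 : Int) = ["U2"] := by decide
  have h00 := pvMain (PySem.Str.split₀ s) 0 0 (by norm_num) (by norm_num) (by norm_num) (by norm_num)
  have h01 := pvMain (PySem.Str.split₀ s) 0 1 (by norm_num) (by norm_num) (by norm_num) (by norm_num)
  have h03 := pvMain (PySem.Str.split₀ s) 0 3 (by norm_num) (by norm_num) (by norm_num) (by norm_num)
  have h02 := pvMain (PySem.Str.split₀ s) 0 2 (by norm_num) (by norm_num) (by norm_num) (by norm_num)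
  have h10 := pvMain (PySem.Str.split₀ s) 1 0 (by norm_num) (by norm_num) (by norm_num) (by norm_num)
  have h11 := pvMain (PySem.Str.split₀ s) 1 1 (by norm_num) (by norm_num) (by norm_num) (by norm_num)
  have h13 := pvMain (PySem.Str.split₀ s) 1 3 (by norm_num) (by norm_num) (by norm_num) (by norm_num)
  have h12 := pvMain (PySem.Str.split₀ s) 1 2 (by norm_num) (by norm_num) (by norm_num) (by norm_num)
  have h30 := pvMain (PySem.Str.split₀ s) 3 0 (by norm_num) (by norm_num) (by norm_num) (by norm_num)
  have h31 := pvMain (PySem.Str.split₀ s) 3 1 (by norm_num) (by norm_num) (by norm_num) (by norm_num)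
  have h33 := pvMain (PySem.Str.split₀ s) 3 3 (by norm_num) (by norm_num) (by norm_num) (by norm_num)
  have h32 := pvMain (PySem.Str.split₀ s) 3 2 (by norm_num) (by norm_num) (by norm_num) (by norm_num)
  have h20 := pvMain (PySem.Str.split₀ s) 2 0 (by norm_num) (by norm_num) (by norm_num) (by norm_num)
  have h21 := pvMain (PySem.Str.split₀ s) 2 1 (by norm_num) (by norm_num) (by norm_num) (by norm_num)
  have h23 := pvMain (PySem.Str.split₀ s) 2 3 (by norm_num) (by norm_num) (by norm_num) (by norm_num)
  have h22 := pvMain (PySem.Str.split₀ s) 2 2 (by norm_num) (by norm_num) (by norm_num) (by norm_num)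
  simp only [ed0, ed1, ed3, ed2, List.nil_append, List.append_nil,
    List.singleton_append] at h00 h01 h03 h02 h10 h11 h13 h12 h30 h31 h33 h32 h20 h21 h23 h22 ⊢
  exact ⟨h00, h01, h03, h02, h10, h11, h13, h12, h30, h31, h33, h32, h20, h21, h23, h22⟩
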